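-- pv_equiv track=rewrite | github.com/Oussama-Lahlimi/NLP | mini_projet (2).py | apprendre_Etiquettes
-- ===== SOURCE A (Python) =====
-- def apprendre_Etiquettes(corpus):
--     lexique = {}
--     for mot, etiquette in corpus:
--         if mot not in lexique:
--             lexique[mot] = {}
--         if etiquette not in lexique[mot]:
--             #si le mot n'existe pas on cree un dictionnaire vide a comme clé le mot
--             lexique[mot][etiquette] = 0
--         lexique[mot][etiquette] += 1
--     return lexique
-- ===== SOURCE B (Python) =====
-- def apprendre_Etiquettes(corpus):
--     # Pass 1: flat frequency table over (mot, etiquette) pairs.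
--     tally = {}
--     for paire in corpus:
--         tally[paire] = tally.get(paire, 0) + 1
--     # Pass 2: rebuild the nested dict from the flat table.
--     lexique = {}
--     for (mot, etiquette), n in tally.items():
--         if mot not in lexique:
--             lexique[mot] = {}
--         lexique[mot][etiquette] = n
--     return lexique
-- ===== Notes on version B (the rewrite author's own statement) =====
-- stated objective: alternative
-- what changed: Replaces the single pass that increments nested per-word counters with two differently-shaped passes: one flat tally over (mot, etiquette) pairs, then a rebuild of the nested dict from the finished table.
import Mathlib
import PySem

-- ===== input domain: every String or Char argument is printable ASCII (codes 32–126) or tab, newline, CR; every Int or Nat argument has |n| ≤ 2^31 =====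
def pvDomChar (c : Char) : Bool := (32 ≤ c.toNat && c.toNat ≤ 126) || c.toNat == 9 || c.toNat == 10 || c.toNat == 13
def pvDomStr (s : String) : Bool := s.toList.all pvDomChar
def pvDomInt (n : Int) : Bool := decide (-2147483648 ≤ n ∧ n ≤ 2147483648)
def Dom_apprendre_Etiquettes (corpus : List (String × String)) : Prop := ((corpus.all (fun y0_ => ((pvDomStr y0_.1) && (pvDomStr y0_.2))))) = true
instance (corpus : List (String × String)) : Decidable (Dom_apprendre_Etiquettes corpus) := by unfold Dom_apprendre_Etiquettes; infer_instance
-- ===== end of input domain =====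

-- B replaces A's single incrementing pass over nested dicts by a flat (mot, etiquette) tally pass
-- followed by a rebuild pass over the tally's items (objective: alternative decomposition, same cost).

-- ===== PORT A =====
-- one loop iteration of A: 'if mot not in lexique: lexique[mot] = {}',
-- 'if etiquette not in lexique[mot]: lexique[mot][etiquette] = 0', 'lexique[mot][etiquette] += 1'
-- (the += on the then-present key is Dict.modify with default 0, exact here)
def pvStepA (lex : PySem.Dict String (PySem.Dict String Int)) (p : String × String) :
    PySem.Dict String (PySem.Dict String Int) :=
  let lex := if lex.contains p.1 then lex else lex.insert p.1 PySem.Dict.empty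
  let lex := if (lex.getD p.1 PySem.Dict.empty).contains p.2 then lex
             else lex.insert p.1 ((lex.getD p.1 PySem.Dict.empty).insert p.2 0)
  lex.insert p.1 ((lex.getD p.1 PySem.Dict.empty).modify p.2 0 (· + 1))

def apprendre_Etiquettes (corpus : List (String × String)) : List (String × List (String × Int)) :=
  (corpus.foldl pvStepA PySem.Dict.empty).items.map (fun q => (q.1, q.2.items))

-- ===== PORT B =====
-- pass 1 of Source B: tally[paire] = tally.get(paire, 0) + 1
def pvTallyB (corpus : List (String × String)) : PySem.Dict (String × String) Int :=
  corpus.foldl (fun d p => d.insert p (d.getD p 0 + 1)) PySem.Dict.empty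

-- pass 2 of Source B: 'if mot not in lexique: lexique[mot] = {}', 'lexique[mot][etiquette] = n'
def pvStepB (lex : PySem.Dict String (PySem.Dict String Int)) (q : (String × String) × Int) :
    PySem.Dict String (PySem.Dict String Int) :=
  let lex := if lex.contains q.1.1 then lex else lex.insert q.1.1 PySem.Dict.empty
  lex.insert q.1.1 ((lex.getD q.1.1 PySem.Dict.empty).insert q.1.2 q.2)

def apprendre_Etiquettes_alt (corpus : List (String × String)) : List (String × List (String × Int)) :=
  ((pvTallyB corpus).items.foldl pvStepB PySem.Dict.empty).items.map (fun q => (q.1, q.2.items))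

-- ===== PRECONDITION & SPEC =====
def Spec_apprendre_Etiquettes (corpus : List (String × String)) (out : List (String × List (String × Int))) : Prop := out = apprendre_Etiquettes_alt corpus
instance (corpus : List (String × String)) (out : List (String × List (String × Int))) : Decidable (Spec_apprendre_Etiquettes corpus out) := by unfold Spec_apprendre_Etiquettes; infer_instance

-- ===== CLAIM (what is proved, stated in full; the proofs are below) =====
def Claim_equal_apprendre_Etiquettes : Prop := ∀ (corpus : List (String × String)), Dom_apprendre_Etiquettes corpus → Spec_apprendre_Etiquettes corpus (apprendre_Etiquettes corpus)

-- ===== LEMMAS AND PROOFS =====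

-- A's loop body collapses to one insert of a modified inner dict
theorem pvStepA_eq (lex : PySem.Dict String (PySem.Dict String Int)) (p : String × String) :
    pvStepA lex p = lex.insert p.1 ((lex.getD p.1 PySem.Dict.empty).modify p.2 0 (· + 1)) := by
  unfold pvStepA
  by_cases h1 : lex.contains p.1
  · by_cases h2 : (lex.getD p.1 PySem.Dict.empty).contains p.2
    · simp [h1, h2]
    · have h2' : (lex.getD p.1 PySem.Dict.empty).getD p.2 0 = 0 :=
        PySem.Dict.getD_of_not_contains _ _ (by simpa using h2)
      simp [h1, h2, PySem.Dict.modify, h2', PySem.Dict.getD_insert_self,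
        PySem.Dict.insert_insert_self]
  · have h1' : lex.getD p.1 PySem.Dict.empty = PySem.Dict.empty :=
      PySem.Dict.getD_of_not_contains _ _ (by simpa using h1)
    simp [h1, h1', PySem.Dict.modify, PySem.Dict.getD_insert_self,
      PySem.Dict.insert_insert_self, PySem.Dict.getD_empty]

-- B's loop body collapses to one insert
theorem pvStepB_eq (lex : PySem.Dict String (PySem.Dict String Int)) (q : (String × String) × Int) :
    pvStepB lex q = lex.insert q.1.1 ((lex.getD q.1.1 PySem.Dict.empty).insert q.1.2 q.2) := by
  unfold pvStepB
  by_cases h1 : lex.contains q.1.1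
  · simp [h1]
  · have h1' : lex.getD q.1.1 PySem.Dict.empty = PySem.Dict.empty :=
      PySem.Dict.getD_of_not_contains _ _ (by simpa using h1)
    simp [h1, h1', PySem.Dict.getD_insert_self, PySem.Dict.insert_insert_self]

-- generic: a lookup after a keyed insert-fold is a fold over the matching elements only
theorem pvGetD_fold {α ν : Type} (l : List α) (key : α → String) (g : ν → α → ν)
    (lex : PySem.Dict String ν) (dflt : ν) (mot : String) :
    ((l.foldl (fun d a => d.insert (key a) (g (d.getD (key a) dflt) a)) lex).getD mot dflt)
      = (l.filter (fun a => key a == mot)).foldl g (lex.getD mot dflt) := by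
  induction l generalizing lex with
  | nil => rfl
  | cons a l ih =>
    simp only [List.foldl_cons, List.filter_cons]
    by_cases h : key a = mot
    · subst h
      simp [ih, PySem.Dict.getD_insert_self]
    · rw [ih]
      have : (lex.insert (key a) (g (lex.getD (key a) dflt) a)).getD mot dflt = lex.getD mot dflt := by
        rw [PySem.Dict.getD_insert]; simp [Ne.symm h]
      simp [h, this]

theorem pvAdd_of_mem {α : Type} [BEq α] [LawfulBEq α] (s : PySem.Set α) (x : α) (h : x ∈ s) :
    s.add x = s := by
  simp [PySem.Set.add, h]

theorem pvAdd_of_not_mem {α : Type} [BEq α] [LawfulBEq α] (s : PySem.Set α) (x : α) (h : x ∉ s) :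
    s.add x = s ++ [x] := by
  simp [PySem.Set.add, h]

-- dedup-after-map equals map-after-dedup re-deduplicated
theorem pvOfList_map_ofList {α β : Type} [BEq α] [LawfulBEq α] [BEq β] [LawfulBEq β] (xs : List α) (f : α → β) :
    PySem.Set.ofList ((PySem.Set.ofList xs).map f) = PySem.Set.ofList (xs.map f) := by
  induction xs using List.reverseRecOn with
  | nil => rfl
  | append_singleton xs x ih =>
    rw [PySem.Set.ofList_append_singleton, List.map_append, List.map_singleton,
      PySem.Set.ofList_append_singleton]
    by_cases h : x ∈ PySem.Set.ofList xs
    · rw [pvAdd_of_mem _ _ h, ih, pvAdd_of_mem]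
      rw [PySem.Set.mem_ofList]
      exact List.mem_map_of_mem ((PySem.Set.mem_ofList xs x).1 h)
    · rw [pvAdd_of_not_mem _ _ h, List.map_append, List.map_singleton,
        PySem.Set.ofList_append_singleton, ih]

-- filtering the dedup then projecting equals dedup of the filtered projection,
-- when the projection is injective on elements passing the filter
theorem pvMap_filter_ofList {α β : Type} [BEq α] [LawfulBEq α] [BEq β] [LawfulBEq β]
    (xs : List α) (P : α → Bool) (f : α → β)
    (hinj : ∀ a, P a = true → ∀ b, P b = true → f a = f b → a = b) :
    ((PySem.Set.ofList xs).filter P).map f = PySem.Set.ofList ((xs.filter P).map f) := by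
  induction xs using List.reverseRecOn with
  | nil => rfl
  | append_singleton xs x ih =>
    rw [PySem.Set.ofList_append_singleton, List.filter_append]
    by_cases h : x ∈ PySem.Set.ofList xs
    · rw [pvAdd_of_mem _ _ h]
      by_cases hp : P x = true
      · have hf : List.filter P [x] = [x] := by simp [hp]
        rw [hf, List.map_append, List.map_singleton, PySem.Set.ofList_append_singleton, ih,
          pvAdd_of_mem]
        rw [PySem.Set.mem_ofList]
        exact List.mem_map_of_mem (List.mem_filter.2 ⟨(PySem.Set.mem_ofList xs x).1 h, hp⟩)
      · have hf : List.filter P [x] = [] := by simp [hp]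
        rw [hf, List.append_nil, ih]
    · rw [pvAdd_of_not_mem _ _ h, List.filter_append]
      by_cases hp : P x = true
      · have hf : List.filter P [x] = [x] := by simp [hp]
        rw [hf, List.map_append, List.map_singleton, List.map_append, List.map_singleton,
          PySem.Set.ofList_append_singleton, ih, pvAdd_of_not_mem]
        intro hmem
        rw [PySem.Set.mem_ofList] at hmem
        obtain ⟨y, hy, hfy⟩ := List.mem_map.1 hmem
        obtain ⟨hyxs, hyP⟩ := List.mem_filter.1 hy
        exact h ((PySem.Set.mem_ofList xs x).2 (hinj y hyP x hp hfy ▸ hyxs))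
      · have hf : List.filter P [x] = [] := by simp [hp]
        rw [hf, List.append_nil, List.append_nil, ih]

theorem pvCount_snd (xs : List (String × String)) (mot et : String) :
    ((xs.filter (fun p => p.1 == mot)).map (fun p => p.2)).count et = xs.count (mot, et) := by
  induction xs with
  | nil => rfl
  | cons p xs ih =>
    rw [List.filter_cons, List.count_cons]
    by_cases h1 : p.1 = mot
    · by_cases h2 : p.2 = et
      · have : p = (mot, et) := by cases p; simp_all
        simp [this, ih]
      · have : ¬ p = (mot, et) := by cases p; simp_all
        simp [h1, h2, this, ih]
    · have : ¬ p = (mot, et) := by cases p; simp_all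
      simp [h1, this, ih]

-- A's inner dict for a word is the Counter of that word's tags
theorem pvInnerA (corpus : List (String × String)) (mot : String) :
    ((corpus.foldl pvStepA PySem.Dict.empty).getD mot PySem.Dict.empty)
      = PySem.Dict.counter ((corpus.filter (fun p => p.1 == mot)).map (fun p => p.2)) := by
  have hstep : pvStepA = fun lex p =>
      lex.insert p.1 ((lex.getD p.1 PySem.Dict.empty).modify p.2 0 (· + 1)) :=
    funext fun lex => funext fun p => pvStepA_eq lex p
  have h := pvGetD_fold corpus (fun p => p.1)
      (fun (inner : PySem.Dict String Int) p => inner.modify p.2 0 (· + 1))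
      PySem.Dict.empty PySem.Dict.empty mot
  rw [hstep]
  refine h.trans ?_
  rw [PySem.Dict.getD_empty, PySem.Dict.counter_eq_foldl, List.foldl_map]

theorem pvKeysA (corpus : List (String × String)) :
    (corpus.foldl pvStepA PySem.Dict.empty).keys = PySem.Set.ofList (corpus.map (fun p => p.1)) := by
  have hstep : pvStepA = fun lex p =>
      lex.insert p.1 ((lex.getD p.1 PySem.Dict.empty).modify p.2 0 (· + 1)) :=
    funext fun lex => funext fun p => pvStepA_eq lex p
  rw [hstep]
  exact (PySem.Dict.keys_foldl_insert_key corpus (fun p => p.1)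
      (fun (d : PySem.Dict String (PySem.Dict String Int)) p =>
        (d.getD p.1 PySem.Dict.empty).modify p.2 0 (· + 1)) PySem.Dict.empty).trans
    (by rw [PySem.Dict.keys_empty, PySem.Set.update_nil_left])

theorem pvNodupA (corpus : List (String × String)) :
    (corpus.foldl pvStepA PySem.Dict.empty).keys.Nodup := by
  rw [pvKeysA]; exact PySem.Set.nodup_ofList _

theorem pvTallyB_eq (corpus : List (String × String)) :
    pvTallyB corpus = PySem.Dict.counter corpus := by
  rw [pvTallyB, PySem.Dict.foldl_insert_getD_add_one_eq_counter]

theorem pvKeysB (corpus : List (String × String)) :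
    (((pvTallyB corpus).items).foldl pvStepB PySem.Dict.empty).keys
      = PySem.Set.ofList (corpus.map (fun p => p.1)) := by
  have hstep : pvStepB = fun lex q =>
      lex.insert q.1.1 ((lex.getD q.1.1 PySem.Dict.empty).insert q.1.2 q.2) :=
    funext fun lex => funext fun q => pvStepB_eq lex q
  rw [hstep]
  refine (PySem.Dict.keys_foldl_insert_key ((pvTallyB corpus).items) (fun q => q.1.1)
      (fun (d : PySem.Dict String (PySem.Dict String Int)) q =>
        (d.getD q.1.1 PySem.Dict.empty).insert q.1.2 q.2) PySem.Dict.empty).trans ?_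
  rw [PySem.Dict.keys_empty, PySem.Set.update_nil_left, pvTallyB_eq, PySem.Dict.items_counter,
    List.map_map]
  have : ((fun (q : (String × String) × Int) => q.1.1) ∘ fun k => (k, (corpus.count k : Int)))
      = fun p => p.1 := rfl
  rw [this, pvOfList_map_ofList]

theorem pvNodupB (corpus : List (String × String)) :
    (((pvTallyB corpus).items).foldl pvStepB PySem.Dict.empty).keys.Nodup := by
  rw [pvKeysB]; exact PySem.Set.nodup_ofList _

-- B's inner dict for a word, via the fresh-distinct-keys rebuild pass
theorem pvInnerB (corpus : List (String × String)) (mot : String) :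
    ((((pvTallyB corpus).items).foldl pvStepB PySem.Dict.empty).getD mot PySem.Dict.empty).items
      = (((PySem.Set.ofList corpus).filter (fun p => p.1 == mot)).map
          (fun p => (p, (corpus.count p : Int)))).map (fun q => (q.1.2, q.2)) := by
  have hstep : pvStepB = fun lex q =>
      lex.insert q.1.1 ((lex.getD q.1.1 PySem.Dict.empty).insert q.1.2 q.2) :=
    funext fun lex => funext fun q => pvStepB_eq lex q
  rw [hstep]
  have h := pvGetD_fold ((pvTallyB corpus).items) (fun q => q.1.1)
      (fun (inner : PySem.Dict String Int) q => inner.insert q.1.2 q.2)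
      PySem.Dict.empty PySem.Dict.empty mot
  rw [h, PySem.Dict.getD_empty, pvTallyB_eq, PySem.Dict.items_counter, List.filter_map]
  have hcomp : ((fun (q : (String × String) × Int) => q.1.1 == mot)
      ∘ fun k => (k, (corpus.count k : Int))) = fun p => p.1 == mot := rfl
  rw [hcomp]
  have hT : ((PySem.Set.ofList corpus).filter (fun p => p.1 == mot)).Nodup :=
    (PySem.Set.nodup_ofList corpus).filter _
  refine (PySem.Dict.items_foldl_insert_fresh _
      (fun (q : (String × String) × Int) => q.1.2) (fun q => q.2)
      PySem.Dict.empty (fun a _ => PySem.Dict.contains_empty _) ?_).trans ?_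
  swap
  · show ([] : List (String × Int)) ++ _ = _; rw [List.nil_append]
  rw [List.map_map]
  have : ((fun (q : (String × String) × Int) => q.1.2) ∘ fun p => (p, (corpus.count p : Int)))
      = fun p => p.2 := rfl
  rw [this]
  refine List.Nodup.map_on ?_ hT
  intro x hx y hy hxy
  have hx1 : x.1 = mot := by simpa using (List.mem_filter.1 hx).2
  have hy1 : y.1 = mot := by simpa using (List.mem_filter.1 hy).2
  exact Prod.ext (hx1.trans hy1.symm) hxy

-- the Counter of a word's tags lists exactly what B's rebuild pass inserts for that word
theorem pvInnerEq (corpus : List (String × String)) (mot : String) :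
    (PySem.Dict.counter ((corpus.filter (fun p => p.1 == mot)).map (fun p => p.2))).items
      = (((PySem.Set.ofList corpus).filter (fun p => p.1 == mot)).map
          (fun p => (p, (corpus.count p : Int)))).map (fun q => (q.1.2, q.2)) := by
  rw [PySem.Dict.items_counter, List.map_map,
    ← pvMap_filter_ofList corpus (fun p => p.1 == mot) (fun p => p.2) ?_, List.map_map]
  · apply List.map_congr_left
    intro p hp
    have h1 : p.1 = mot := by simpa using (List.mem_filter.1 hp).2
    have h2 : ((corpus.filter (fun p => p.1 == mot)).map (fun p => p.2)).count p.2
        = corpus.count (mot, p.2) := pvCount_snd corpus mot p.2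
    simp only [Function.comp]
    rw [h2, show ((mot, p.2) : String × String) = p from Prod.ext h1.symm rfl]
  · intro a ha b hb hab
    exact Prod.ext ((eq_of_beq ha).trans (eq_of_beq hb).symm) hab

-- ===== VERDICT (by name: the statement is the Claim_ definition above) =====
theorem apprendre_Etiquettes_spec : Claim_equal_apprendre_Etiquettes := by
  intro corpus _
  unfold Spec_apprendre_Etiquettes apprendre_Etiquettes apprendre_Etiquettes_alt
  rw [PySem.Dict.items_eq_map_keys _ (pvNodupA corpus) PySem.Dict.empty,
      PySem.Dict.items_eq_map_keys _ (pvNodupB corpus) PySem.Dict.empty,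
      List.map_map, List.map_map, pvKeysA, pvKeysB]
  apply List.map_congr_left
  intro mot _
  simp only [Function.comp]
  rw [pvInnerA, pvInnerEq, pvInnerB]
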